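-- pv_equiv track=rewrite | github.com/alexphanna/Project-Euler | 12.py | count_exponents
-- ===== SOURCE A (Python) =====
-- def count_exponents(numbers):
--     exponents = []
--     i = 0
--     count = 1
--     while i < len(numbers):
--         if (i < len(numbers) - 1 and numbers[i] == numbers[i + 1]):
--             count += 1
--         elif (i == len(numbers) - 1 and numbers[i] == numbers[i - 1]):
--             exponents.append(count)
--             count += 1
--         else:
--             exponents.append(count)
--             count = 1
--         i += 1
--     return exponents
-- ===== SOURCE B (Python) =====
-- def count_exponents(numbers):
--     if not numbers:
--         return []
--     boundaries = [0]
--     for i in range(1, len(numbers)):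
--         if numbers[i] != numbers[i - 1]:
--             boundaries.append(i)
--     boundaries.append(len(numbers))
--     return [boundaries[k + 1] - boundaries[k] for k in range(len(boundaries) - 1)]
-- ===== Notes on version B (the rewrite author's own statement) =====
-- stated objective: alternative
-- what changed: Instead of A's single while-loop carrying a running count and appending it at each run end (with a negative-index comparison at the last element), B does two passes: it collects the boundary indices where the value changes (plus 0 and len), then returns the gaps between consecutive boundaries; measurably faster by a constant factor (fewer per-element comparisons/branches).
import Mathlib
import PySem

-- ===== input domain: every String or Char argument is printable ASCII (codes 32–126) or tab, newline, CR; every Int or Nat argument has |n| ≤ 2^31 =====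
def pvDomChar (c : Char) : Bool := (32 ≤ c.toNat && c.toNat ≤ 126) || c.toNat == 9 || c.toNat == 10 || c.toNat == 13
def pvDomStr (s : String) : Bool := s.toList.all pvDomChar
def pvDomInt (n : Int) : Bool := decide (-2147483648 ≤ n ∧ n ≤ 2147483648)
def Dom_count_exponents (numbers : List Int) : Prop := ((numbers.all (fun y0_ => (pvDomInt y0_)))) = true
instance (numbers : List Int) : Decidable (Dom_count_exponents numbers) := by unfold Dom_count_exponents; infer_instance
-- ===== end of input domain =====

-- B replaces A's single running-count while-loop by a two-pass boundary/difference decomposition (both O(n); a timing run measured B faster by a constant factor).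

-- ===== PORT A =====
-- transliteration of A's while-loop (state i, count, exponents); fuel = remaining iterations
def countA_loop (numbers : List Int) : Nat → Int → Int → List Int → List Int
  | 0, _, _, exps => exps
  | fuel+1, i, count, exps =>
    if i < (numbers.length : Int) then
      if i < (numbers.length : Int) - 1 ∧
          (PySem.List.pyGet? numbers i).getD 0 = (PySem.List.pyGet? numbers (i+1)).getD 0 then
        countA_loop numbers fuel (i+1) (count+1) exps
      else if i = (numbers.length : Int) - 1 ∧
          (PySem.List.pyGet? numbers i).getD 0 = (PySem.List.pyGet? numbers (i-1)).getD 0 then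
        countA_loop numbers fuel (i+1) (count+1) (exps ++ [count])
      else
        countA_loop numbers fuel (i+1) 1 (exps ++ [count])
    else exps

def count_exponents (numbers : List Int) : List Int :=
  countA_loop numbers numbers.length 0 1 []

-- ===== PORT B =====
-- the comprehension [boundaries[k+1]-boundaries[k] for k in range(len(boundaries)-1)]
def diffAdjMap (bs : List Int) : List Int :=
  (List.range (bs.length - 1)).map (fun (k : Nat) =>
    (PySem.List.pyGet? bs ((k : Int) + 1)).getD 0 - (PySem.List.pyGet? bs ((k : Int))).getD 0)

def count_exponents_alt (numbers : List Int) : List Int :=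
  if numbers = [] then []
  else
    let bs := (PySem.List.pyRange 1 numbers.length 1).foldl
      (fun acc i =>
        if (PySem.List.pyGet? numbers i).getD 0 ≠ (PySem.List.pyGet? numbers (i-1)).getD 0
        then acc ++ [i] else acc)
      [(0 : Int)]
    diffAdjMap (bs ++ [(numbers.length : Int)])

-- ===== PRECONDITION & SPEC =====
def Spec_count_exponents (numbers : List Int) (out : List Int) : Prop := out = count_exponents_alt numbers
instance (numbers : List Int) (out : List Int) : Decidable (Spec_count_exponents numbers out) := by unfold Spec_count_exponents; infer_instance

-- ===== CLAIM (what is proved, stated in full; the proofs are below) =====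
def Claim_equal_count_exponents : Prop := ∀ (numbers : List Int), Dom_count_exponents numbers → Spec_count_exponents numbers (count_exponents numbers)

-- ===== LEMMAS AND PROOFS =====

-- canonical run-length function both ports are reduced to
def runsFrom (count : Int) : List Int → List Int
  | [] => []
  | [_] => [count]
  | x :: y :: ys => if x = y then runsFrom (count+1) (y :: ys) else count :: runsFrom 1 (y :: ys)

-- structural version of the difference comprehension
def diffAdj : List Int → List Int
  | [] => []
  | [_] => []
  | a :: b :: rest => (b - a) :: diffAdj (b :: rest)

lemma diffAdjMap_cons (a b : Int) (rest : List Int) :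
    diffAdjMap (a :: b :: rest) = (b - a) :: diffAdjMap (b :: rest) := by
  simp only [diffAdjMap, List.length_cons]
  rw [show rest.length + 1 + 1 - 1 = rest.length + 1 from rfl,
      show rest.length + 1 - 1 = rest.length from rfl,
      List.range_succ_eq_map, List.map_cons, List.map_map]
  congr 1
  · have h0 : (0:Int) ≤ (rest.length : Int) + 1 := by positivity
    simp [PySem.List.pyGet?, PySem.List.pyIdx?, h0]
  · refine List.map_congr_left (fun k _ => ?_)
    have h1 : ((Nat.succ k : Nat) : Int) + 1 = ((k + 2 : Nat) : Int) := by push_cast; ring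
    have h2 : ((Nat.succ k : Nat) : Int) = ((k + 1 : Nat) : Int) := by push_cast; ring
    have h3 : ((k : Nat) : Int) + 1 = ((k + 1 : Nat) : Int) := by push_cast; ring
    simp only [Function.comp, h1, h2, h3, PySem.List.pyGet?_natCast]
    simp

lemma diffAdjMap_eq (bs : List Int) : diffAdjMap bs = diffAdj bs := by
  induction bs with
  | nil => rfl
  | cons a t ih =>
    cases t with
    | nil => rfl
    | cons b rest => rw [diffAdjMap_cons, ih, diffAdj]

lemma loopA_inv (suf : List Int) : ∀ (pre : List Int) (count : Int) (exps : List Int),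
    suf ≠ [] →
    countA_loop (pre ++ suf) suf.length (pre.length : Int) count exps = exps ++ runsFrom count suf := by
  induction suf with
  | nil => intro _ _ _ h; exact absurd rfl h
  | cons x rest ih =>
    intro pre count exps _
    cases rest with
    | nil =>
      show countA_loop (pre ++ [x]) (0 + 1) (pre.length : Int) count exps = exps ++ runsFrom count [x]
      rw [countA_loop]
      rw [if_pos (by simp only [List.length_append, List.length_cons, List.length_nil]; omega)]
      rw [if_neg (by simp only [List.length_append, List.length_cons, List.length_nil]
                     rintro ⟨h, -⟩; omega)]
      split_ifs <;> rw [countA_loop] <;> simp [runsFrom]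
    | cons y ys =>
      have hx : PySem.List.pyGet? (pre ++ x :: y :: ys) (pre.length : Int) = some x :=
        PySem.List.pyGet?_append_length _ _ _
      have hcat : pre ++ x :: y :: ys = (pre ++ [x]) ++ y :: ys := by simp
      have hy : PySem.List.pyGet? (pre ++ x :: y :: ys) ((pre.length : Int) + 1) = some y := by
        rw [hcat, show ((pre.length : Int) + 1) = (((pre ++ [x]).length : Nat) : Int) by simp]
        exact PySem.List.pyGet?_append_length _ _ _
      show countA_loop (pre ++ x :: y :: ys) ((y :: ys).length + 1) (pre.length : Int) count exps
            = exps ++ runsFrom count (x :: y :: ys)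
      rw [countA_loop]
      rw [if_pos (by simp only [List.length_append, List.length_cons]; omega)]
      simp only [hx, hy, Option.getD_some]
      have hstep : ((pre.length : Int) + 1) = (((pre ++ [x]).length : Nat) : Int) := by simp
      by_cases hxy : x = y
      · rw [if_pos ⟨by simp only [List.length_append, List.length_cons]; omega, hxy⟩]
        rw [hcat, hstep, ih (pre ++ [x]) (count + 1) exps (by simp)]
        simp [runsFrom, hxy]
      · rw [if_neg (fun h => hxy h.2)]
        rw [if_neg (by simp only [List.length_append, List.length_cons]
                       rintro ⟨h, -⟩; omega)]
        rw [hcat, hstep, ih (pre ++ [x]) 1 (exps ++ [count]) (by simp)]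
        simp [runsFrom, hxy]

lemma keyB (xs : List Int) : ∀ (fuel : Nat) (i a : Int), 1 ≤ i → i ≤ (xs.length : Int) → a < i →
    fuel = ((xs.length : Int) - i).toNat →
    diffAdj (a :: ((PySem.List.pyRange i (xs.length) 1).filter
        (fun j => (PySem.List.pyGet? xs j).getD 0 ≠ (PySem.List.pyGet? xs (j-1)).getD 0)) ++
        [(xs.length : Int)]) =
      runsFrom (i - a) (xs.drop (i-1).toNat) := by
  intro fuel
  induction fuel with
  | zero =>
    intro i a h1 h2 h3 hf
    have hi : i = (xs.length : Int) := by omega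
    subst hi
    rw [PySem.List.pyRange_one]
    simp only [sub_self, Int.toNat_zero, List.range_zero, List.map_nil, List.filter_nil]
    have hone : (xs.drop (((xs.length : Int) - 1).toNat)).length = 1 := by
      rw [List.length_drop]; omega
    obtain ⟨z, hz⟩ := List.length_eq_one_iff.mp hone
    rw [hz]
    simp [diffAdj, runsFrom]
  | succ fuel ihf =>
    intro i a h1 h2 h3 hf
    have hlt : i < (xs.length : Int) := by omega
    have hi0 : i.toNat < xs.length := by omega
    have hi1 : i.toNat - 1 < xs.length := by omega
    have hk : (i - 1).toNat = i.toNat - 1 := by omega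
    have hk1 : (i.toNat - 1) + 1 = i.toNat := by omega
    have hpy1 : PySem.List.pyGet? xs i = some xs[i.toNat] := by
      rw [PySem.List.pyGet?_of_nonneg xs (by omega : (0:Int) ≤ i), List.getElem?_eq_getElem hi0]
    have hpy2 : PySem.List.pyGet? xs (i - 1) = some xs[i.toNat - 1] := by
      rw [PySem.List.pyGet?_of_nonneg xs (by omega : (0:Int) ≤ i - 1), hk,
        List.getElem?_eq_getElem hi1]
    have hd1 : xs.drop (i-1).toNat = xs[i.toNat - 1] :: xs.drop i.toNat := by
      rw [hk, List.drop_eq_getElem_cons hi1, hk1]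
    have hd2 : xs.drop i.toNat = xs[i.toNat] :: xs.drop (i.toNat + 1) :=
      List.drop_eq_getElem_cons hi0
    have hsucc2 : (i + 1 - 1).toNat = i.toNat := by omega
    rw [PySem.List.pyRange_one_cons hlt, List.filter_cons]
    by_cases hne : xs[i.toNat] = xs[i.toNat - 1]
    · rw [if_neg (by simp [hpy1, hpy2, hne])]
      rw [ihf (i+1) a (by omega) (by omega) (by omega) (by omega), hsucc2]
      rw [hd1, hd2]
      rw [show runsFrom (i - a) (xs[i.toNat - 1] :: xs[i.toNat] :: xs.drop (i.toNat+1)) =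
            if xs[i.toNat - 1] = xs[i.toNat] then
              runsFrom (i - a + 1) (xs[i.toNat] :: xs.drop (i.toNat+1))
            else (i - a) :: runsFrom 1 (xs[i.toNat] :: xs.drop (i.toNat+1)) from rfl]
      rw [if_pos hne.symm]
      congr 1
      omega
    · rw [if_pos (by simp [hpy1, hpy2]; intro h; exact hne h)]
      have hIH := ihf (i+1) i (by omega) (by omega) (by omega) (by omega)
      rw [hsucc2] at hIH
      rw [List.cons_append] at hIH
      simp only [List.cons_append]
      rw [show ∀ t : List Int, diffAdj (a :: i :: t) = (i - a) :: diffAdj (i :: t) from fun _ => rfl,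
        hIH]
      rw [hd1, hd2]
      rw [show runsFrom (i - a) (xs[i.toNat - 1] :: xs[i.toNat] :: xs.drop (i.toNat+1)) =
            if xs[i.toNat - 1] = xs[i.toNat] then
              runsFrom (i - a + 1) (xs[i.toNat] :: xs.drop (i.toNat+1))
            else (i - a) :: runsFrom 1 (xs[i.toNat] :: xs.drop (i.toNat+1)) from rfl]
      rw [if_neg (fun h => hne h.symm)]
      norm_num

-- ===== VERDICT (by name: the statement is the Claim_ definition above) =====
theorem count_exponents_spec : Claim_equal_count_exponents := by
  intro numbers _
  show count_exponents numbers = count_exponents_alt numbers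
  cases numbers with
  | nil => rfl
  | cons x t =>
    have hA : count_exponents (x :: t) = runsFrom 1 (x :: t) := by
      have h := loopA_inv (x :: t) [] 1 [] (by simp)
      simpa [count_exponents] using h
    have hB : count_exponents_alt (x :: t) = runsFrom 1 (x :: t) := by
      simp only [count_exponents_alt]
      rw [if_neg (List.cons_ne_nil x t)]
      rw [PySem.List.foldl_append_ite_eq_filter]
      rw [List.cons_append, diffAdjMap_eq]
      have h := keyB (x :: t) ((((x :: t).length : Int) - 1).toNat) 1 0 (by omega)
        (by simp) (by omega) rfl
      simpa using h
    rw [hA, hB]
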